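-- pv_equiv track=rewrite | github.com/chiennguyen99/agedetector_group | solution_knn/lib.py | list_max_values
-- ===== SOURCE A (Python) =====
-- def list_find_max(list):
--     max = list[0]
--     for i in range(1, len(list)):
--         if list[i] > max:
--             max = list[i]
--     return max
--
-- def list_max_values(list):
--     max = list_find_max(list=list)
--     count = 0
--     for i in range(0, len(list)):
--         if list[i] == max:
--             count = count + 1
--     if count > 1:
--         return True
--     else:
--         return False
-- ===== SOURCE B (Python) =====
-- def list_max_values(list):
--     m = list[0]
--     count = 1
--     for x in list[1:]:
--         if x > m:
--             m = x
--             count = 1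
--         elif x == m:
--             count += 1
--     return count > 1
-- ===== Notes on version B (the rewrite author's own statement) =====
-- stated objective: simpler
-- what changed: Replaces A's two index-based passes (one helper call to find the max, then a second full scan counting it) by a single fused pass that keeps a running max and a count that resets to 1 whenever a new strict max appears.
import Mathlib
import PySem

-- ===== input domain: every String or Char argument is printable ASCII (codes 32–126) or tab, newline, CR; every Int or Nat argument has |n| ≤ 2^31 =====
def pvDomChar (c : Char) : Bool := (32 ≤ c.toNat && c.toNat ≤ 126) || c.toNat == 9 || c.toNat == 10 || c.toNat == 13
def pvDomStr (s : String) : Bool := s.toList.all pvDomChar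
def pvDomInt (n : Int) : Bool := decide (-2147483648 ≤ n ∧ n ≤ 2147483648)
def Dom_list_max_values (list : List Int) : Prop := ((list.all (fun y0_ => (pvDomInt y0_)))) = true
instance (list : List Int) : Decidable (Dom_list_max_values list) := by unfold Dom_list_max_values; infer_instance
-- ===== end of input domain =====

-- B fuses A's two passes (find max, then count it) into one scan keeping a running max and a count; same return value on every non-empty list (both raise IndexError on []).


-- ===== PORT A =====
def list_find_max (list : List Int) : Int :=
  (PySem.List.pyRange 1 (PySem.List.len list) 1).foldl
    (fun max i => if PySem.List.pyGetD list i 0 > max then PySem.List.pyGetD list i 0 else max)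
    (PySem.List.pyGetD list 0 0)

def list_max_values (list : List Int) : Bool :=
  let max := list_find_max list
  let count := (PySem.List.pyRange 0 (PySem.List.len list) 1).foldl
    (fun count i => if PySem.List.pyGetD list i 0 = max then count + 1 else count) (0 : Int)
  if count > 1 then true else false

-- ===== PORT B =====
def list_max_values_alt (list : List Int) : Bool :=
  match list with
  | [] => false   -- unreachable under Pre_ (Python B raises IndexError on [])
  | x :: rest =>
    let p := rest.foldl
      (fun (p : Int × Int) y =>
        if y > p.1 then (y, 1) else if y = p.1 then (p.1, p.2 + 1) else p)
      (x, (1 : Int))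
    decide (p.2 > 1)

-- ===== PRECONDITION & SPEC =====
-- Both Pythons raise IndexError on the empty list (list[0]).
def Pre_list_max_values (list : List Int) : Prop := list ≠ []
instance (list : List Int) : Decidable (Pre_list_max_values list) := by unfold Pre_list_max_values; infer_instance
def pvWitness_list_max_values : List Int := ([1, 2, 2])

def Spec_list_max_values (list : List Int) (out : Bool) : Prop := out = list_max_values_alt list
instance (list : List Int) (out : Bool) : Decidable (Spec_list_max_values list out) := by unfold Spec_list_max_values; infer_instance

-- ===== CLAIM (what is proved, stated in full; the proofs are below) =====
def Claim_equal_list_max_values : Prop := ∀ (list : List Int), Dom_list_max_values list → Pre_list_max_values list → Spec_list_max_values list (list_max_values list)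

-- ===== LEMMAS AND PROOFS =====

-- A's hand-written "if y > m then y else m" step is max.
lemma foldA_eq_foldl_max (rest : List Int) (x : Int) :
    rest.foldl (fun m y => if y > m then y else m) x = rest.foldl max x := by
  induction rest generalizing x with
  | nil => rfl
  | cons y t ih =>
    simp only [List.foldl_cons, ih]
    congr 1
    by_cases h : y > x <;> simp [max_def] <;> omega

-- Invariant of B's fused loop: it computes the running max together with the
-- number of occurrences of the final max (plus the carried count if the max never moved).
lemma foldB_inv (rest : List Int) (m c : Int) :
    rest.foldl
      (fun (p : Int × Int) y =>
        if y > p.1 then (y, 1) else if y = p.1 then (p.1, p.2 + 1) else p)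
      (m, c)
    = (rest.foldl max m,
       (if rest.foldl max m = m then c else 0)
         + (rest.countP (fun y => y = rest.foldl max m) : Int)) := by
  induction rest generalizing m c with
  | nil => simp
  | cons y t ih =>
    simp only [List.foldl_cons, List.countP_cons]
    by_cases h1 : y > m
    · have hmy : max m y = y := by omega
      rw [if_pos h1, ih]
      simp only [hmy]
      have hself : y ≤ t.foldl max y := (PySem.List.le_foldl_max t y).1
      have hMne : ¬ t.foldl max y = m := by omega
      rw [if_neg hMne]
      by_cases h2 : t.foldl max y = y
      · simp [h2]; ring
      · have hd : (decide (y = t.foldl max y)) = false := by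
          simp; exact fun e => h2 e.symm
        simp [h2, hd]
    · rw [if_neg h1]
      have hmy : max m y = m := by omega
      have hself : m ≤ t.foldl max m := (PySem.List.le_foldl_max t m).1
      by_cases h2 : y = m
      · rw [if_pos h2, ih]
        simp only [hmy]
        by_cases h3 : t.foldl max m = m
        · simp [h3, h2]; ring
        · have hd : (decide (y = t.foldl max m)) = false := by simp [h2]; omega
          simp [h3, hd]
      · rw [if_neg h2, ih]
        simp only [hmy]
        have hd : (decide (y = t.foldl max m)) = false := by simp; omega
        simp [hd]

-- A's counting pass counts occurrences of mx in the whole list.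
lemma foldA_count (l : List Int) (mx : Int) :
    l.foldl (fun c y => if y = mx then c + 1 else c) (0 : Int)
      = (l.countP (fun y => y = mx) : Int) := by
  have := PySem.List.foldl_count_if (fun y => decide (y = mx)) l 0
  simpa using this

-- ===== VERDICT (by name: the statement is the Claim_ definition above) =====
theorem list_max_values_spec : Claim_equal_list_max_values := by
  intro l _hd hpre
  unfold Spec_list_max_values list_max_values list_max_values_alt list_find_max
  match l with
  | [] => exact absurd rfl hpre
  | x :: rest =>
    have hA : (PySem.List.pyRange 1 (PySem.List.len (x :: rest)) 1).foldl
        (fun m i => if PySem.List.pyGetD (x :: rest) i 0 > m then PySem.List.pyGetD (x :: rest) i 0 else m)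
        (PySem.List.pyGetD (x :: rest) 0 0)
        = rest.foldl max x := by
      rw [PySem.List.foldl_pyRange_pyGetD (x :: rest) 0
            (fun m v => if v > m then v else m) (PySem.List.pyGetD (x :: rest) 0 0) (by norm_num)]
      have h0 : PySem.List.pyGetD (x :: rest) 0 0 = x := by
        simp [PySem.List.pyGetD, PySem.List.pyGet?, PySem.List.pyIdx?]
      rw [h0]
      simpa using foldA_eq_foldl_max rest x
    have hC : (PySem.List.pyRange 0 (PySem.List.len (x :: rest)) 1).foldl
        (fun c i => if PySem.List.pyGetD (x :: rest) i 0 = rest.foldl max x then c + 1 else c) (0 : Int)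
        = ((x :: rest).countP (fun y => y = rest.foldl max x) : Int) := by
      rw [PySem.List.foldl_pyRange_zero_pyGetD (x :: rest) 0
            (fun c v => if v = rest.foldl max x then c + 1 else c) (0 : Int)]
      exact foldA_count (x :: rest) (rest.foldl max x)
    simp only [hA, hC, foldB_inv rest x 1]
    have hx : x ≤ rest.foldl max x := (PySem.List.le_foldl_max rest x).1
    simp only [List.countP_cons]
    by_cases h : rest.foldl max x = x
    · have hx' : (decide (x = rest.foldl max x)) = true := by simp [h]
      simp only [h]
      push_cast
      by_cases hgt : 1 + ((rest.countP (fun y => decide (y = x)) : Int)) > 1 <;>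
        simp_all
    · have hx' : (decide (x = rest.foldl max x)) = false := by simp; omega
      simp only [if_neg h, hx']
      push_cast
      by_cases hgt : ((rest.countP (fun y => decide (y = rest.foldl max x)) : Int)) > 1 <;>
        simp_all
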